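-- pv_equiv track=rewrite | github.com/adinashby-vanier-college/programming-in-science-assignment-2-Stephane-Martin-Muscaliuc | Assignment2.py | max_two_in_list
-- ===== SOURCE A (Python) =====
-- def max_two_in_list(numbers):
--     maxNum1 = 0
--     maxNum2 = 0
--     sortedNums = sorted(numbers)
--
--
--     maxNum1 = sortedNums[-1]
--
--
--     for i in range(len(sortedNums) - 1, -1, -1):
--         if sortedNums[i] < maxNum1:
--             maxNum2 = sortedNums[i]
--             break
--
--
--     else:
--             return (maxNum1, None)
--
--
--     return (maxNum1, maxNum2)
-- ===== SOURCE B (Python) =====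
-- def max_two_in_list(numbers):
--     m1 = None
--     m2 = None
--     for x in numbers:
--         if m1 is None:
--             m1 = x
--         elif x > m1:
--             m2 = m1
--             m1 = x
--         elif x < m1:
--             if m2 is None or x > m2:
--                 m2 = x
--     return (m1, m2)
-- ===== Notes on version B (the rewrite author's own statement) =====
-- stated objective: alternative
-- what changed: Replaces sort-then-backward-scan with a single pass that tracks the maximum and the largest value strictly below it.
import Mathlib
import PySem

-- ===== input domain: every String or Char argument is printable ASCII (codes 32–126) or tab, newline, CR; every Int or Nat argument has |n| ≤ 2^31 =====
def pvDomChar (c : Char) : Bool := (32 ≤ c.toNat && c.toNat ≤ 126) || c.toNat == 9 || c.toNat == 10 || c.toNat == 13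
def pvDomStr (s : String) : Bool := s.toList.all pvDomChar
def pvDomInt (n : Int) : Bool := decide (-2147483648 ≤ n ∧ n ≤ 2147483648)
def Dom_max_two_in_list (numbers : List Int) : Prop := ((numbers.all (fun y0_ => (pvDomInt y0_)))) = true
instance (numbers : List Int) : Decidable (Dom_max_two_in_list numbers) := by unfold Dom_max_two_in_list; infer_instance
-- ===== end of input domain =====

-- B replaces A's sort + backward index scan by one pass that tracks the maximum and the
-- largest value strictly below it (a different algorithm; neither program mutates its input).

-- ===== PORT A =====
-- the backward 'for i in range(len(sortedNums)-1, -1, -1)' with break/else: returns the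
-- first sortedNums[i] < maxNum1, or none if the loop falls through (the 'else:' branch)
def pvAScan (s : List Int) (maxNum1 : Int) : List Int → Option Int
  | [] => none
  | i :: rest =>
    match PySem.List.pyGet? s i with
    | some v => if v < maxNum1 then some v else pvAScan s maxNum1 rest
    | none => pvAScan s maxNum1 rest    -- unreachable: every index from the range is in bounds

def max_two_in_list (numbers : List Int) : List (Option Int) :=
  let sortedNums := PySem.List.sorted numbers (fun x => x) false
  match PySem.List.pyGet? sortedNums (-1) with
  | none => []    -- IndexError on the empty list; excluded by Pre_
  | some maxNum1 =>
    match pvAScan sortedNums maxNum1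
        (PySem.List.pyRange ((sortedNums.length : Int) - 1) (-1) (-1)) with
    | none => [some maxNum1, none]
    | some maxNum2 => [some maxNum1, some maxNum2]

-- ===== PORT B =====
def pvBLoop : List Int → Option Int → Option Int → Option Int × Option Int
  | [], m1, m2 => (m1, m2)
  | x :: rest, none, m2 => pvBLoop rest (some x) m2
  | x :: rest, some a, m2 =>
    if a < x then pvBLoop rest (some x) (some a)
    else if x < a then
      (match m2 with
       | none => pvBLoop rest (some a) (some x)
       | some b => if b < x then pvBLoop rest (some a) (some x) else pvBLoop rest (some a) (some b))
    else pvBLoop rest (some a) m2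

def max_two_in_list_alt (numbers : List Int) : List (Option Int) :=
  let p := pvBLoop numbers none none
  [p.1, p.2]

-- ===== PRECONDITION & SPEC =====
-- Pre_ excludes only the empty list, on which A raises IndexError when it indexes the last sorted element
def Pre_max_two_in_list (numbers : List Int) : Prop := numbers ≠ []
instance (numbers : List Int) : Decidable (Pre_max_two_in_list numbers) := by unfold Pre_max_two_in_list; infer_instance
def pvWitness_max_two_in_list : List Int := ([3, 1, 2])

def Spec_max_two_in_list (numbers : List Int) (out : List (Option Int)) : Prop := out = max_two_in_list_alt numbers
instance (numbers : List Int) (out : List (Option Int)) : Decidable (Spec_max_two_in_list numbers out) := by unfold Spec_max_two_in_list; infer_instance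

-- ===== CLAIM (what is proved, stated in full; the proofs are below) =====
def Claim_equal_max_two_in_list : Prop := ∀ (numbers : List Int), Dom_max_two_in_list numbers → Pre_max_two_in_list numbers → Spec_max_two_in_list numbers (max_two_in_list numbers)
-- ===== LEMMAS AND PROOFS =====

-- max of two optional values (none = "no value yet")
def omax : Option Int → Option Int → Option Int
  | none, y => y
  | some u, none => some u
  | some u, some v => some (max u v)

-- running max of a list of optional candidates
def smax? (l : List Int) : Option Int := l.foldr (fun x acc => omax (some x) acc) none

theorem smax?_cons (x : Int) (l : List Int) : smax? (x :: l) = omax (some x) (smax? l) := rfl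

theorem omax_left_comm (x y : Int) (z : Option Int) :
    omax (some x) (omax (some y) z) = omax (some y) (omax (some x) z) := by
  cases z with
  | none => simp [omax, max_comm]
  | some w => simp [omax, max_left_comm]

theorem omax_absorb {u w : Int} (z : Option Int) (h : u ≤ w) :
    omax (some u) (omax (some w) z) = omax (some w) z := by
  cases z with
  | none => simp [omax, max_eq_right h]
  | some v => simp [omax]; exact Or.inl h

theorem smax?_mem_le {l : List Int} (hne : l ≠ []) :
    ∃ m, smax? l = some m ∧ m ∈ l ∧ ∀ y ∈ l, y ≤ m := by
  induction l with
  | nil => exact absurd rfl hne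
  | cons x t ih =>
    cases t with
    | nil => exact ⟨x, rfl, by simp, by simp⟩
    | cons y u =>
      obtain ⟨m, hm, hmem, hle⟩ := ih (by simp)
      refine ⟨max x m, ?_, ?_, ?_⟩
      · rw [smax?_cons, hm]; rfl
      · rcases le_total x m with h | h
        · rw [max_eq_right h]; exact List.mem_cons_of_mem _ hmem
        · rw [max_eq_left h]; exact List.mem_cons_self
      · intro z hz
        rcases List.mem_cons.mp hz with rfl | hz
        · exact le_max_left _ _
        · exact le_trans (hle z hz) (le_max_right _ _)

theorem smax?_perm {l₁ l₂ : List Int} (h : l₁.Perm l₂) : smax? l₁ = smax? l₂ := by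
  induction h with
  | nil => rfl
  | cons x _ ih => rw [smax?_cons, smax?_cons, ih]
  | swap x y l => rw [smax?_cons, smax?_cons, smax?_cons, smax?_cons]; exact omax_left_comm y x _
  | trans _ _ ih₁ ih₂ => exact ih₁.trans ih₂

-- sorted (Pairwise ≤) list: its last element is its running max
theorem getLast?_eq_smax? {l : List Int} (hs : l.Pairwise (· ≤ ·)) :
    l.getLast? = smax? l := by
  induction l with
  | nil => rfl
  | cons x t ih =>
    cases t with
    | nil => rfl
    | cons y u =>
      have hs' : (y :: u).Pairwise (· ≤ ·) := hs.of_cons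
      have hx : ∀ z ∈ y :: u, x ≤ z := by
        intro z hz; exact List.rel_of_pairwise_cons hs hz
      obtain ⟨m, hm, hmem, _⟩ := smax?_mem_le (l := y :: u) (by simp)
      have : (x :: y :: u).getLast? = (y :: u).getLast? := by simp
      rw [this, ih hs', smax?_cons x (y :: u), hm]
      simp [omax, max_eq_right (hx m hmem)]

-- the backward index scan of A is find? over the reversed list
theorem pvAScan_range (s : List Int) (m1 : Int) :
    ∀ (k : Nat), k ≤ s.length →
      pvAScan s m1 (PySem.List.pyRange ((k : Int) - 1) (-1) (-1)) =
        (s.take k).reverse.find? (fun v => decide (v < m1)) := by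
  intro k
  induction k with
  | zero =>
    intro _
    rw [PySem.List.pyRange_neg_one_eq_nil (by omega)]
    simp [pvAScan]
  | succ k ih =>
    intro hk
    have hk' : k < s.length := by omega
    have hcons : PySem.List.pyRange (((k : Nat) + 1 : Int) - 1) (-1) (-1) =
        ((k : Nat) : Int) :: PySem.List.pyRange (((k : Nat) : Int) - 1) (-1) (-1) := by
      have := PySem.List.pyRange_neg_one_cons (a := ((k : Nat) + 1 : Int) - 1) (b := -1) (by omega)
      simpa using this
    have hget : PySem.List.pyGet? s ((k : Nat) : Int) = some s[k] := by
      rw [PySem.List.pyGet?_natCast]; simp [hk']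
    have htake : s.take (k + 1) = s.take k ++ [s[k]] := by
      rw [List.take_add_one]; simp [hk']
    push_cast
    rw [hcons]
    simp only [pvAScan, hget]
    rw [htake, List.reverse_append]
    by_cases hv : s[k] < m1
    · simp [hv]
    · simp only [List.reverse_cons, List.reverse_nil, List.nil_append, List.cons_append,
        List.find?]
      simp [hv, ih (by omega)]

-- running max over a list equals max of head with running max of the tail
theorem foldl_max_init (u : List Int) : ∀ (x y : Int),
    u.foldl max (max x y) = max x (u.foldl max y) := by
  induction u with
  | nil => intro x y; rfl
  | cons z u ih =>
    intro x y
    simp only [List.foldl_cons]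
    rw [max_assoc, ih]

theorem smax?_eq_foldl (t : List Int) : ∀ (x : Int), smax? (x :: t) = some (t.foldl max x) := by
  induction t with
  | nil => intro x; rfl
  | cons y u ih =>
    intro x
    rw [smax?_cons, ih y]
    simp only [omax, List.foldl_cons]
    rw [foldl_max_init]

-- B's loop invariant: starting from max a and a candidate b < a, the loop returns the
-- running max and the omax of b with the elements of (a :: xs) strictly below that max
theorem pvBLoop_inv :
    ∀ (xs : List Int) (a : Int) (b : Option Int), (∀ v, b = some v → v < a) →
      pvBLoop xs (some a) b =
        (some (xs.foldl max a),
         omax b (smax? ((a :: xs).filter (fun z => decide (z < xs.foldl max a))))) := by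
  intro xs
  induction xs with
  | nil =>
    intro a b hb
    cases b with
    | none => simp [pvBLoop, smax?, omax]
    | some v => simp [pvBLoop, smax?, omax]
  | cons x rest ih =>
    intro a b hb
    by_cases hax : a < x
    · -- x > m1 : new max x, second becomes a
      have hstep : pvBLoop (x :: rest) (some a) b = pvBLoop rest (some x) (some a) := by
        simp [pvBLoop, hax]
      have hM : (x :: rest).foldl max a = rest.foldl max x := by
        simp only [List.foldl_cons]; rw [max_eq_right (le_of_lt hax)]
      have haM : a < rest.foldl max x := lt_of_lt_of_le hax ((PySem.List.le_foldl_max rest x).1)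
      rw [hstep, ih x (some a) (by intro v hv; cases hv; exact hax), hM]
      have hfil : (a :: x :: rest).filter (fun z => decide (z < rest.foldl max x)) =
          a :: (x :: rest).filter (fun z => decide (z < rest.foldl max x)) := by
        rw [List.filter_cons]; simp [haM]
      rw [hfil, smax?_cons]
      cases b with
      | none => rfl
      | some v =>
        have hv := hb v rfl
        rw [omax_absorb _ (le_of_lt hv)]
    · by_cases hxa : x < a
      · -- x < m1 : max unchanged, maybe update second
        have hM : (x :: rest).foldl max a = rest.foldl max a := by
          simp only [List.foldl_cons]; rw [max_eq_left (le_of_lt hxa)]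
        have hxM : x < rest.foldl max a := lt_of_lt_of_le hxa ((PySem.List.le_foldl_max rest a).1)
        -- pushing x through the filtered smax?
        have hswap : smax? ((a :: x :: rest).filter (fun z => decide (z < rest.foldl max a))) =
            omax (some x) (smax? ((a :: rest).filter (fun z => decide (z < rest.foldl max a)))) := by
          by_cases haM : a < rest.foldl max a
          · rw [List.filter_cons, List.filter_cons, List.filter_cons]
            simp only [haM, hxM, decide_true, if_true]
            rw [smax?_cons, smax?_cons, smax?_cons, omax_left_comm]
          · rw [List.filter_cons, List.filter_cons, List.filter_cons]
            simp only [haM, hxM, decide_true, decide_false, Bool.false_eq_true, if_true, if_false]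
            rw [smax?_cons]
        cases b with
        | none =>
          have hstep : pvBLoop (x :: rest) (some a) none = pvBLoop rest (some a) (some x) := by
            simp [pvBLoop, hax, hxa]
          rw [hstep, ih a (some x) (by intro v hv; cases hv; exact hxa), hM, hswap]
          rfl
        | some v =>
          have hv := hb v rfl
          by_cases hvx : v < x
          · have hstep : pvBLoop (x :: rest) (some a) (some v) = pvBLoop rest (some a) (some x) := by
              simp [pvBLoop, hax, hxa, hvx]
            rw [hstep, ih a (some x) (by intro w hw; cases hw; exact hxa), hM, hswap,
              omax_absorb _ (le_of_lt hvx)]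
          · have hstep : pvBLoop (x :: rest) (some a) (some v) = pvBLoop rest (some a) (some v) := by
              simp [pvBLoop, hax, hxa, hvx]
            rw [hstep, ih a (some v) hb, hM, hswap, omax_left_comm,
              omax_absorb _ (by omega : x ≤ v)]
      · -- x == m1 : state unchanged
        have hxea : x = a := by omega
        subst hxea
        have hstep : pvBLoop (x :: rest) (some x) b = pvBLoop rest (some x) b := by
          simp [pvBLoop, hax, hxa]
        have hM : (x :: rest).foldl max x = rest.foldl max x := by
          simp only [List.foldl_cons, max_self]
        rw [hstep, ih x b hb, hM]
        have hfil : (x :: x :: rest).filter (fun z => decide (z < rest.foldl max x)) =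
            (if x < rest.foldl max x then [x] else []) ++
              (x :: rest).filter (fun z => decide (z < rest.foldl max x)) := by
          by_cases hxM : x < rest.foldl max x <;>
            simp [hxM]
        rw [hfil]
        by_cases hxM : x < rest.foldl max x
        · simp only [hxM, if_true, List.singleton_append]
          rw [smax?_cons]
          have hx2 : (x :: rest).filter (fun z => decide (z < rest.foldl max x)) =
              x :: rest.filter (fun z => decide (z < rest.foldl max x)) := by
            rw [List.filter_cons]; simp [hxM]
          rw [hx2, smax?_cons, omax_absorb _ (le_refl x)]
        · simp [hxM]

theorem pvBLoop_top (x : Int) (t : List Int) :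
    pvBLoop (x :: t) none none =
      (some (t.foldl max x), smax? ((x :: t).filter (fun y => decide (y < t.foldl max x)))) := by
  have := pvBLoop_inv t x none (by intro v h; cases h)
  simp [pvBLoop]; rw [this]; simp [omax]

-- ===== VERDICT (by name: the statement is the Claim_ definition above) =====
theorem max_two_in_list_spec : Claim_equal_max_two_in_list := by
  intro numbers _ hpre
  unfold Spec_max_two_in_list
  cases numbers with
  | nil => exact absurd rfl hpre
  | cons h t =>
    -- B's value
    unfold max_two_in_list_alt
    rw [pvBLoop_top]
    -- A's value
    unfold max_two_in_list
    have hperm : (PySem.List.sorted (h :: t) (fun x => x) false).Perm (h :: t) :=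
      PySem.List.sorted_perm _ _ _
    have hpair : (PySem.List.sorted (h :: t) (fun x => x) false).Pairwise (· ≤ ·) := by
      have := PySem.List.sorted_pairwise (xs := h :: t) (key := fun x => x)
      simpa using this
    -- the max: last of the sorted list is the running max of the input
    have hlast : PySem.List.pyGet? (PySem.List.sorted (h :: t) (fun x => x) false) (-1) =
        some (t.foldl max h) := by
      rw [PySem.List.pyGet?_neg_one, getLast?_eq_smax? hpair, smax?_perm hperm, smax?_eq_foldl]
    -- the backward scan: running max of the kept (strictly smaller) elements
    have hscan : pvAScan (PySem.List.sorted (h :: t) (fun x => x) false) (t.foldl max h)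
        (PySem.List.pyRange
          (((PySem.List.sorted (h :: t) (fun x => x) false).length : Int) - 1) (-1) (-1)) =
        smax? ((h :: t).filter (fun z => decide (z < t.foldl max h))) := by
      rw [pvAScan_range _ _ _ (le_refl _), List.take_length, ← List.head?_filter,
        List.filter_reverse, List.head?_reverse,
        getLast?_eq_smax? (hpair.filter _), smax?_perm (hperm.filter _)]
    simp only [hlast, hscan]
    cases hres : smax? ((h :: t).filter (fun z => decide (z < t.foldl max h))) <;> rfl
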